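-- pv_equiv track=rewrite | github.com/nikhalster/algo-ds-practice | HackerRank/InterviewPreparationKit/TripleSum.py | triplets
-- ===== SOURCE A (Python) =====
-- def triplets(a, b, c):
--     # a,b,c = set(a), set(b), set(c)
--     # O(n3) solution
--     # for num2 in b:
--     #     for num1 in a:
--     #         for num3 in c:
--     #             if num2 >= num3 and num1 <= num2:
--     #                 count += 1
--
--     a = (sorted(set(a)))
--     b = (sorted(set(b)))
--     c = (sorted(set(c)))
--
--     i = 0
--     j = 0
--     ans = 0
--
--     for num2 in b:
--         while i < len(a) and a[i] <= num2:
--             i += 1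
--
--         while j < len(c) and c[j] <= num2:
--             j += 1
--
--         ans += i * j
--
--     return ans
-- ===== SOURCE B (Python) =====
-- import bisect
--
-- def triplets(a, b, c):
--     a = sorted(set(a))
--     b = sorted(set(b))
--     c = sorted(set(c))
--     return sum(bisect.bisect_right(a, x) * bisect.bisect_right(c, x) for x in b)
-- ===== Notes on version B (the rewrite author's own statement) =====
-- stated objective: idiomatic
-- what changed: Replaced the two maintained monotone i/j pointers threaded through the loop over b by independent per-element binary searches (bisect.bisect_right) into the sorted deduplicated a and c, summed with a generator expression.
import Mathlib
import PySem

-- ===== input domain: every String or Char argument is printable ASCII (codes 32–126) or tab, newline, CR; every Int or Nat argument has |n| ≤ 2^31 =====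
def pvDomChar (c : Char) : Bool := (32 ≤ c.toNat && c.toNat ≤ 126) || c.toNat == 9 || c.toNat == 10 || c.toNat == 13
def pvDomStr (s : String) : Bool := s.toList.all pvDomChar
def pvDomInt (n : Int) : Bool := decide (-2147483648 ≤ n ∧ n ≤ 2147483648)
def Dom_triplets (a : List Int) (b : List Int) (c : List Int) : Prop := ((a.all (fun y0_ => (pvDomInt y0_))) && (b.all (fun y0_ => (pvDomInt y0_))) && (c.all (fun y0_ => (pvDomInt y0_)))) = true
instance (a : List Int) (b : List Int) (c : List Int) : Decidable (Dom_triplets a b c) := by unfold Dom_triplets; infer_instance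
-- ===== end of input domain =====

-- B replaces A's two maintained monotone pointers by independent per-element
-- binary searches (bisect_right) into the sorted deduplicated lists (idiomatic).

-- ===== PORT A =====
-- the inner 'while i < len(l) and l[i] <= x: i += 1' loop
def pvAdvance (l : List Int) (x : Int) (i : Nat) : Nat :=
  if h : i < l.length then
    if l[i] ≤ x then pvAdvance l x (i + 1) else i
  else i
termination_by l.length - i

def triplets (a : List Int) (b : List Int) (c : List Int) : Int :=
  let a' := PySem.List.sorted (PySem.Set.ofList a) (fun t => t)
  let b' := PySem.List.sorted (PySem.Set.ofList b) (fun t => t)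
  let c' := PySem.List.sorted (PySem.Set.ofList c) (fun t => t)
  let s := b'.foldl (fun (s : Nat × Nat × Int) num2 =>
      let i := pvAdvance a' num2 s.1
      let j := pvAdvance c' num2 s.2.1
      (i, j, s.2.2 + (i : Int) * (j : Int))) (0, 0, 0)
  s.2.2

-- ===== PORT B =====
def triplets_alt (a : List Int) (b : List Int) (c : List Int) : Int :=
  let a' := PySem.List.sorted (PySem.Set.ofList a) (fun t => t)
  let b' := PySem.List.sorted (PySem.Set.ofList b) (fun t => t)
  let c' := PySem.List.sorted (PySem.Set.ofList c) (fun t => t)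
  b'.foldl (fun acc x =>
    acc + (PySem.List.bisectRight a' x : Int) * (PySem.List.bisectRight c' x : Int)) 0

-- ===== PRECONDITION & SPEC =====
def Spec_triplets (a : List Int) (b : List Int) (c : List Int) (out : Int) : Prop := out = triplets_alt a b c
instance (a : List Int) (b : List Int) (c : List Int) (out : Int) : Decidable (Spec_triplets a b c out) := by unfold Spec_triplets; infer_instance

-- ===== CLAIM (what is proved, stated in full; the proofs are below) =====
def Claim_equal_triplets : Prop := ∀ (a : List Int) (b : List Int) (c : List Int), Dom_triplets a b c → Spec_triplets a b c (triplets a b c)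

-- ===== LEMMAS AND PROOFS =====

-- on a sorted list, the pointer-advance loop lands exactly at bisect_right,
-- from any start position not past it
theorem pvAdvance_eq (l : List Int) (hs : l.Pairwise (· ≤ ·)) (x : Int) :
    ∀ i, i ≤ PySem.List.bisectRight l x → pvAdvance l x i = PySem.List.bisectRight l x := by
  obtain ⟨hlen, hlt, hge⟩ := PySem.List.bisectRight_spec l x hs
  intro i hi
  induction i using pvAdvance.induct l x with
  | case1 i h hle ih =>
    rcases Nat.lt_or_ge i (PySem.List.bisectRight l x) with hi' | hi'
    · rw [pvAdvance, dif_pos h, if_pos hle]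
      exact ih hi'
    · have := hge i h hi'
      rw [pvAdvance, dif_pos h, if_neg (by omega)]
      omega
  | case2 i h hgt =>
    rcases Nat.lt_or_ge i (PySem.List.bisectRight l x) with hi' | hi'
    · exact absurd (hlt i h hi') hgt
    · rw [pvAdvance, dif_pos h, if_neg hgt]; omega
  | case3 i h =>
    rw [pvAdvance, dif_neg h]; omega

theorem bisectRight_mono (l : List Int) (hs : l.Pairwise (· ≤ ·)) {x y : Int} (hxy : x ≤ y) :
    PySem.List.bisectRight l x ≤ PySem.List.bisectRight l y := by
  obtain ⟨hlenx, hltx, hgex⟩ := PySem.List.bisectRight_spec l x hs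
  obtain ⟨hleny, hlty, hgey⟩ := PySem.List.bisectRight_spec l y hs
  by_contra h
  push_neg at h
  have hj : PySem.List.bisectRight l y < l.length := lt_of_lt_of_le h hlenx
  have h1 := hltx _ hj h
  have h2 := hgey _ hj (le_refl _)
  omega

theorem fold_eq (a' c' : List Int) (ha : a'.Pairwise (· ≤ ·)) (hc : c'.Pairwise (· ≤ ·)) :
    ∀ (bs : List Int), bs.Pairwise (· ≤ ·) →
    ∀ (i j : Nat) (acc : Int),
      (∀ x ∈ bs, i ≤ PySem.List.bisectRight a' x) →
      (∀ x ∈ bs, j ≤ PySem.List.bisectRight c' x) →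
      (bs.foldl (fun (s : Nat × Nat × Int) num2 =>
          let i := pvAdvance a' num2 s.1
          let j := pvAdvance c' num2 s.2.1
          (i, j, s.2.2 + (i : Int) * (j : Int))) (i, j, acc)).2.2
      = bs.foldl (fun acc x =>
          acc + (PySem.List.bisectRight a' x : Int) * (PySem.List.bisectRight c' x : Int)) acc := by
  intro bs
  induction bs with
  | nil => intro _ i j acc _ _; rfl
  | cons x t ih =>
    intro hp i j acc hia hjc
    rw [List.pairwise_cons] at hp
    obtain ⟨hx, ht⟩ := hp
    simp only [List.foldl_cons]
    rw [pvAdvance_eq a' ha x i (hia x (List.mem_cons_self))]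
    rw [pvAdvance_eq c' hc x j (hjc x (List.mem_cons_self))]
    exact ih ht _ _ _
      (fun y hy => bisectRight_mono a' ha (hx y hy))
      (fun y hy => bisectRight_mono c' hc (hx y hy))

-- ===== VERDICT (by name: the statement is the Claim_ definition above) =====
theorem triplets_spec : Claim_equal_triplets := by
  intro a b c _
  unfold Spec_triplets triplets triplets_alt
  have ha := (PySem.List.sorted_ofList_pairwise_lt a).imp (fun h => le_of_lt h)
  have hc := (PySem.List.sorted_ofList_pairwise_lt c).imp (fun h => le_of_lt h)
  have hb := (PySem.List.sorted_ofList_pairwise_lt b).imp (fun h => le_of_lt h)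
  exact fold_eq _ _ ha hc _ hb 0 0 0 (fun _ _ => Nat.zero_le _) (fun _ _ => Nat.zero_le _)
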